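-- pv_equiv track=rewrite | github.com/epiphany40223/epiphany | media/linux/ps-queries/sync-google-group.py | _member_in_any_workgroup
-- ===== SOURCE A (Python) =====
-- def _member_in_any_workgroup(member, workgroups):
--     if 'py workgroups' not in member:
--         return False, False
--
--     found_any = False
--     poster_of_any = False
--     for name in workgroups:
--         # member['py workgroups'] is a dictionary of
--         # WORKGROUP_NAME:{more data} items.
--         if name in member['py workgroups']:
--             found_any = True
--         if f'{name} Ldr' in member['py workgroups'] or \
--            f'{name} Leader' in member['py workgroups']:
--             found_any = True
--             poster_of_any = True
--
--     return found_any, poster_of_any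
-- ===== SOURCE B (Python) =====
-- def _member_in_any_workgroup(member, workgroups):
--     if 'py workgroups' not in member:
--         return False, False
--
--     wg = set(workgroups)
--     keys = list(member['py workgroups'])
--     # Pass 1: is the member a leader of any workgroup?  Recognise leader
--     # entries among the member's own keys by stripping the suffix.
--     poster_of_any = any(
--         (k.endswith(' Ldr') and k[:-4] in wg) or
--         (k.endswith(' Leader') and k[:-7] in wg)
--         for k in keys)
--     # Pass 2: plain membership (a leader counts as found too).
--     found_any = poster_of_any or any(k in wg for k in keys)
--     return found_any, poster_of_any
-- ===== Notes on version B (the rewrite author's own statement) =====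
-- stated objective: alternative
-- what changed: B replaces A's single accumulator loop over workgroups (which concatenates ' Ldr'/' Leader' onto every candidate and probes the member's dict) with two staged any() passes over the member's own workgroup keys against a prebuilt set of names, recognising leader entries by suffix-stripping.
import Mathlib
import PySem

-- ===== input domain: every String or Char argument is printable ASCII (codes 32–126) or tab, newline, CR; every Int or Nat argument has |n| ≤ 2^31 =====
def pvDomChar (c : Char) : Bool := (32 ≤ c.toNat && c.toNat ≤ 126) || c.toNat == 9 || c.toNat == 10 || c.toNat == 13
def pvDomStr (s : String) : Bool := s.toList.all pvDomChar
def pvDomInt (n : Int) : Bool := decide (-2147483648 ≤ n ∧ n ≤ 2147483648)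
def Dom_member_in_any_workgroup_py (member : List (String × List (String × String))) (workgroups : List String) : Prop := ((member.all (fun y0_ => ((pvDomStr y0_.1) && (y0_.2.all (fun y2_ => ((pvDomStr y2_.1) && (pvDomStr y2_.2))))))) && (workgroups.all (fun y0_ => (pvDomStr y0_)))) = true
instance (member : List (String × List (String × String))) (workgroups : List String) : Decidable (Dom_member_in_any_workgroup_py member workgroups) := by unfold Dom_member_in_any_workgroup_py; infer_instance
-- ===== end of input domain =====

-- B computes the pair in two staged any() passes over the member's own workgroup
-- keys against a set of workgroup names (stripping the ' Ldr'/' Leader' suffixes),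
-- instead of A's accumulator loop over workgroups concatenating suffixes; same pair
-- proved on every input.


-- ===== PORT A =====
def member_in_any_workgroup_py (member : List (String × List (String × String))) (workgroups : List String) : Bool × Bool :=
  if !(PySem.Dict.mk member).contains "py workgroups" then (false, false)
  else
    let d := PySem.Dict.mk (PySem.Dict.getD (PySem.Dict.mk member) "py workgroups" [])
    workgroups.foldl (fun st name =>
      let st1 := if d.contains name then (true, st.2) else st
      if d.contains (name ++ " Ldr") || d.contains (name ++ " Leader")
      then (true, true) else st1) (false, false)

-- ===== PORT B =====
def member_in_any_workgroup_py_alt (member : List (String × List (String × String))) (workgroups : List String) : Bool × Bool :=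
  if !(PySem.Dict.mk member).contains "py workgroups" then (false, false)
  else
    let wg := PySem.Set.ofList workgroups
    let keys := (PySem.Dict.mk (PySem.Dict.getD (PySem.Dict.mk member) "py workgroups" [])).keys
    let poster_of_any := keys.any (fun k =>
      (PySem.Str.endswith k " Ldr" && wg.contains (PySem.Str.slice k none (some (-4))))
      || (PySem.Str.endswith k " Leader" && wg.contains (PySem.Str.slice k none (some (-7)))))
    let found_any := poster_of_any || keys.any (fun k => wg.contains k)
    (found_any, poster_of_any)

-- ===== PRECONDITION & SPEC =====
def Spec_member_in_any_workgroup_py (member : List (String × List (String × String))) (workgroups : List String) (out : Bool × Bool) : Prop := out = member_in_any_workgroup_py_alt member workgroups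
instance (member : List (String × List (String × String))) (workgroups : List String) (out : Bool × Bool) : Decidable (Spec_member_in_any_workgroup_py member workgroups out) := by unfold Spec_member_in_any_workgroup_py; infer_instance

-- ===== CLAIM (what is proved, stated in full; the proofs are below) =====
def Claim_equal_member_in_any_workgroup_py : Prop := ∀ (member : List (String × List (String × String))) (workgroups : List String), Dom_member_in_any_workgroup_py member workgroups → Spec_member_in_any_workgroup_py member workgroups (member_in_any_workgroup_py member workgroups)

-- ===== LEMMAS AND PROOFS =====

-- predicates the loops/passes test
def pvP (d : PySem.Dict String String) (n : String) : Bool :=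
  d.contains (n ++ " Ldr") || d.contains (n ++ " Leader")
def pvA (d : PySem.Dict String String) (n : String) : Bool :=
  d.contains n || pvP d n
def pvQP (wg : PySem.Set String) (k : String) : Bool :=
  (PySem.Str.endswith k " Ldr" && wg.contains (PySem.Str.slice k none (some (-4))))
  || (PySem.Str.endswith k " Leader" && wg.contains (PySem.Str.slice k none (some (-7))))

lemma pv_any_or {a : Type} (l : List a) (f g : a -> Bool) :
    l.any (fun x => f x || g x) = (l.any f || l.any g) := by
  induction l with
  | nil => simp
  | cons x xs ih =>
    rw [List.any_cons, List.any_cons, List.any_cons, ih]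
    cases f x <;> cases g x <;> cases xs.any f <;> cases xs.any g <;> rfl

-- A's accumulator loop computes the two `any`s
lemma pv_loopA (d : PySem.Dict String String) (l : List String) (a b : Bool) :
    l.foldl (fun st name =>
      let st1 := if d.contains name then (true, st.2) else st
      if d.contains (name ++ " Ldr") || d.contains (name ++ " Leader")
      then (true, true) else st1) (a, b)
    = (a || l.any (pvA d), b || l.any (pvP d)) := by
  induction l generalizing a b with
  | nil => simp
  | cons x xs ih =>
    rw [List.foldl_cons, List.any_cons, List.any_cons]
    have hstep : (let st1 := if d.contains x then (true, (a, b).2) else (a, b)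
        if d.contains (x ++ " Ldr") || d.contains (x ++ " Leader")
        then (true, true) else st1) = ((a || pvA d x, b || pvP d x) : Bool × Bool) := by
      simp only [pvA, pvP]
      cases h1 : d.contains x <;> cases h2 : d.contains (x ++ " Ldr") <;>
        cases h3 : d.contains (x ++ " Leader") <;> cases a <;> cases b <;> simp
    rw [hstep, ih]
    cases a <;> cases b <;> cases hx : pvA d x <;> cases hy : pvP d x <;> simp

-- k = n ++ suf, characterised by a suffix test and a take
lemma pv_append_suffix (k n suf : List Char) :
    k = n ++ suf ↔ (suf <:+ k ∧ k.take (k.length - suf.length) = n) := by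
  constructor
  · rintro rfl
    exact ⟨List.suffix_append n suf, by simp⟩
  · rintro ⟨⟨t, rfl⟩, h⟩
    simp at h
    rw [← h]

-- string version, with the slice the B port writes
lemma pv_str_decomp (k n suf : String) (m : Nat) (hm : 1 < m)
    (hlen : suf.toList.length = m) :
    k = n ++ suf ↔ (PySem.Str.endswith k suf = true ∧ PySem.Str.slice k none (some (-(m : Int))) = n) := by
  have htl : ∀ s t : String, s = t ↔ s.toList = t.toList := by
    intro s t
    constructor
    · rintro rfl; rfl
    · intro h; exact String.ext h
  rw [htl k (n ++ suf), String.toList_append]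
  rw [pv_append_suffix]
  rw [htl (PySem.Str.slice k none (some (-(m : Int)))) n]
  rw [PySem.Str.toList_slice]
  have : PySem.Chars.slice k.toList none (some (-(m : Int))) = k.toList.take (k.toList.length - m) := by
    have := PySem.List.slice_to_neg_natCast (xs := k.toList) (k := m) (by omega)
    simpa using this
  rw [this, hlen]
  simp [PySem.Str.endswith_eq, PySem.Chars.endswith, List.isSuffixOf_iff_suffix]

lemma pv_str_decomp_ldr (k n : String) :
    k = n ++ " Ldr" ↔ (PySem.Str.endswith k " Ldr" = true ∧ PySem.Str.slice k none (some (-4)) = n) := by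
  have h := pv_str_decomp k n " Ldr" 4 (by omega) (by decide)
  norm_num at h
  exact h

lemma pv_str_decomp_leader (k n : String) :
    k = n ++ " Leader" ↔ (PySem.Str.endswith k " Leader" = true ∧ PySem.Str.slice k none (some (-7)) = n) := by
  have h := pv_str_decomp k n " Leader" 7 (by omega) (by decide)
  norm_num at h
  exact h

-- the leader test agrees: A scans workgroups, B scans the member's keys
lemma pv_anyP_eq (d : PySem.Dict String String) (W : List String) :
    W.any (pvP d) = (d.keys).any (pvQP (PySem.Set.ofList W)) := by
  rw [Bool.eq_iff_iff]
  simp only [List.any_eq_true, pvP, pvQP, Bool.or_eq_true, Bool.and_eq_true,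
    PySem.Dict.contains_iff_mem_keys, PySem.Set.contains_iff, PySem.Set.mem_ofList]
  constructor
  · rintro ⟨n, hn, h | h⟩
    · exact ⟨n ++ " Ldr", h, Or.inl ⟨((pv_str_decomp_ldr _ n).mp rfl).1, by
        rw [((pv_str_decomp_ldr _ n).mp rfl).2]; exact hn⟩⟩
    · exact ⟨n ++ " Leader", h, Or.inr ⟨((pv_str_decomp_leader _ n).mp rfl).1, by
        rw [((pv_str_decomp_leader _ n).mp rfl).2]; exact hn⟩⟩
  · rintro ⟨k, hk, ⟨he, hs⟩ | ⟨he, hs⟩⟩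
    · exact ⟨_, hs, Or.inl (((pv_str_decomp_ldr k _).mpr ⟨he, rfl⟩) ▸ hk)⟩
    · exact ⟨_, hs, Or.inr (((pv_str_decomp_leader k _).mpr ⟨he, rfl⟩) ▸ hk)⟩

-- the full test agrees with B's two staged passes (poster-first, then membership)
lemma pv_anyA_eq (d : PySem.Dict String String) (W : List String) :
    W.any (pvA d)
    = ((d.keys).any (pvQP (PySem.Set.ofList W)) || (d.keys).any (fun k => (PySem.Set.ofList W).contains k)) := by
  have hmem : W.any (fun n => d.contains n) = (d.keys).any (fun k => (PySem.Set.ofList W).contains k) := by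
    rw [Bool.eq_iff_iff]
    simp only [List.any_eq_true, PySem.Dict.contains_iff_mem_keys,
      PySem.Set.contains_iff, PySem.Set.mem_ofList]
    exact ⟨fun ⟨n, hn, h⟩ => ⟨n, h, hn⟩, fun ⟨k, hk, h⟩ => ⟨k, h, hk⟩⟩
  calc W.any (pvA d) = W.any (fun n => (fun x => d.contains x) n || pvP d n) := rfl
    _ = (W.any (fun n => d.contains n) || W.any (pvP d)) := pv_any_or W _ _
    _ = ((d.keys).any (fun k => (PySem.Set.ofList W).contains k) || (d.keys).any (pvQP (PySem.Set.ofList W))) := by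
        rw [hmem, pv_anyP_eq]
    _ = ((d.keys).any (pvQP (PySem.Set.ofList W)) || (d.keys).any (fun k => (PySem.Set.ofList W).contains k)) :=
        Bool.or_comm _ _

-- ===== VERDICT (by name: the statement is the Claim_ definition above) =====
theorem member_in_any_workgroup_py_spec : Claim_equal_member_in_any_workgroup_py := by
  intro member workgroups _
  unfold Spec_member_in_any_workgroup_py member_in_any_workgroup_py member_in_any_workgroup_py_alt
  by_cases h : (PySem.Dict.mk member).contains "py workgroups" = true
  · rw [if_neg (by simp [h]), if_neg (by simp [h])]
    rw [pv_loopA, pv_anyA_eq, pv_anyP_eq]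
    simp only [Bool.false_or]; rfl
  · simp [h]
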